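-- pv_equiv track=rewrite | github.com/bgenchel/Explicitly-Conditioning-Melody-Generation | src/processing/harmony.py | _get_alter_label
-- ===== SOURCE A (Python) =====
-- def _get_alter_label(alter):
--     label = ''
--     while int(alter) < 0:
--         label += 'b'
--         alter += 1
--     while int(alter) > 0:
--         label += '#'
--         alter -= 1
--     return label
-- ===== SOURCE B (Python) =====
-- def _get_alter_label(alter):
--     n = int(alter)
--     return 'b' * -n if n < 0 else '#' * n
-- ===== Notes on version B (the rewrite author's own statement) =====
-- stated objective: faster
-- what changed: Replaced the two decrementing while-loops that build the label one character at a time via repeated string concatenation with a closed-form string repetition on the truncated count.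
import Mathlib
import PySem

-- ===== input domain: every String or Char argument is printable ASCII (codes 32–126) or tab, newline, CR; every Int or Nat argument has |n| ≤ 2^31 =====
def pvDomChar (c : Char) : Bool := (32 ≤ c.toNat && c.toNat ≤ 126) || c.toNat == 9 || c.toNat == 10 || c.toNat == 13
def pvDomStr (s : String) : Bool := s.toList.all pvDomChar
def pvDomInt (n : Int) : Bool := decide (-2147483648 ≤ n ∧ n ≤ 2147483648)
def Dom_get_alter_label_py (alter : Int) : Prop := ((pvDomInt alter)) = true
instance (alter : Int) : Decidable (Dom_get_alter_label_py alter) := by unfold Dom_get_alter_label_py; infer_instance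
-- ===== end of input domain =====

-- ===== PORT A =====
-- B changes: closed-form string repetition instead of two character-appending loops (objective: simpler).
-- while int(alter) < 0: label += 'b'; alter += 1   (int(alter) = alter on Int inputs)
def pvLoopFlat (alter : Int) (label : String) : Int × String :=
  if alter < 0 then pvLoopFlat (alter + 1) (label ++ "b") else (alter, label)
termination_by (-alter).toNat
decreasing_by omega

-- while int(alter) > 0: label += '#'; alter -= 1
def pvLoopSharp (alter : Int) (label : String) : String :=
  if alter > 0 then pvLoopSharp (alter - 1) (label ++ "#") else label
termination_by alter.toNat
decreasing_by omega

def get_alter_label_py (alter : Int) : String :=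
  let r := pvLoopFlat alter ""
  pvLoopSharp r.1 r.2

-- ===== PORT B =====
def get_alter_label_py_alt (alter : Int) : String :=
  if alter < 0 then String.ofList (List.replicate (-alter).toNat 'b')
  else String.ofList (List.replicate alter.toNat '#')

-- ===== PRECONDITION & SPEC =====
def Spec_get_alter_label_py (alter : Int) (out : String) : Prop := out = get_alter_label_py_alt alter
instance (alter : Int) (out : String) : Decidable (Spec_get_alter_label_py alter out) := by unfold Spec_get_alter_label_py; infer_instance

-- ===== CLAIM (what is proved, stated in full; the proofs are below) =====
def Claim_equal_get_alter_label_py : Prop := ∀ (alter : Int), Dom_get_alter_label_py alter → Spec_get_alter_label_py alter (get_alter_label_py alter)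

-- ===== LEMMAS AND PROOFS =====
theorem pvLoopFlat_eq (alter : Int) (label : String) :
    pvLoopFlat alter label = (max alter 0, label ++ String.ofList (List.replicate (-alter).toNat 'b')) := by
  induction alter, label using pvLoopFlat.induct with
  | case1 alter label h ih =>
      rw [pvLoopFlat, if_pos h, ih]
      have hn : (-alter).toNat = (-(alter + 1)).toNat + 1 := by omega
      have hm : max (alter + 1) 0 = max alter 0 := by omega
      rw [hn, hm, List.replicate_succ]
      congr 1
      rw [← String.toList_inj]; simp
  | case2 alter label h =>
      rw [pvLoopFlat, if_neg h]
      have hn : (-alter).toNat = 0 := by omega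
      have hm : max alter 0 = alter := by omega
      rw [hn, hm]
      congr 1
      rw [← String.toList_inj]; simp

theorem pvLoopSharp_eq (alter : Int) (label : String) :
    pvLoopSharp alter label = label ++ String.ofList (List.replicate alter.toNat '#') := by
  induction alter, label using pvLoopSharp.induct with
  | case1 alter label h ih =>
      rw [pvLoopSharp, if_pos h, ih]
      have hn : alter.toNat = (alter - 1).toNat + 1 := by omega
      rw [hn, List.replicate_succ]
      rw [← String.toList_inj]; simp
  | case2 alter label h =>
      rw [pvLoopSharp, if_neg h]
      have hn : alter.toNat = 0 := by omega
      rw [hn, ← String.toList_inj]; simp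

-- ===== VERDICT (by name: the statement is the Claim_ definition above) =====
theorem get_alter_label_py_spec : Claim_equal_get_alter_label_py := by
  intro alter _
  show get_alter_label_py alter = get_alter_label_py_alt alter
  unfold get_alter_label_py get_alter_label_py_alt
  rw [pvLoopFlat_eq, pvLoopSharp_eq]
  by_cases h : alter < 0
  · have h1 : max alter 0 = 0 := by omega
    rw [if_pos h, h1]
    rw [← String.toList_inj]; simp
  · have h2 : (-alter).toNat = 0 := by omega
    have h1 : max alter 0 = alter := by omega
    rw [if_neg h, h1, h2]
    rw [← String.toList_inj]; simp
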